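-- pv_equiv track=rewrite | github.com/SnookeredCoder/name_recommendation | name_recommendation.py | generate_all_possible_regex
-- ===== SOURCE A (Python) =====
-- def generate_all_possible_regex(word):
--     regex_comb = []
--     for i in range(1,len(word)-2):
--         for j in range(i+1,len(word)-1):
--             for k in range(j+1,len(word)):
--                 current = word[:i] + '[a-z]{0,2}' + word[i+1:j] + '[a-z]{0,2}' + word[j+1:k] + '[a-z]{0,2}' + word[k+1:]
--                 regex_comb.append(current)
--     for i in range(1,len(word)-1):
--         for j in range(i+1,len(word)):
--             current = word[:i] + '[a-z]{0,2}' + word[i+1:j] + '[a-z]{0,2}' + word[j+1:]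
--             regex_comb.append(current)
--
--     for i in range(1,len(word)):
--         current = word[:i] + '[a-z]{0,2}' + word[i+1:]
--         regex_comb.append(current)
--
--     return regex_comb
-- ===== SOURCE B (Python) =====
-- def generate_all_possible_regex(word):
--     n = len(word)
--
--     def combos(lo, r):
--         # all increasing index tuples of length r drawn from range(lo, n), lex order
--         if r == 0:
--             return [[]]
--         return [[i] + c for i in range(lo, n) for c in combos(i + 1, r - 1)]
--
--     def build(start, idxs):
--         if not idxs:
--             return word[start:]
--         i = idxs[0]
--         return word[start:i] + '[a-z]{0,2}' + build(i + 1, idxs[1:])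
--
--     return [build(0, c) for r in (3, 2, 1) for c in combos(1, r)]
-- ===== Notes on version B (the rewrite author's own statement) =====
-- stated objective: alternative
-- what changed: Replaces the three separate 3-/2-/1-deep nested loop blocks with one generic recursive combination generator over index tuples plus one recursive string builder that stitches slices between chosen indices.
import Mathlib
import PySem

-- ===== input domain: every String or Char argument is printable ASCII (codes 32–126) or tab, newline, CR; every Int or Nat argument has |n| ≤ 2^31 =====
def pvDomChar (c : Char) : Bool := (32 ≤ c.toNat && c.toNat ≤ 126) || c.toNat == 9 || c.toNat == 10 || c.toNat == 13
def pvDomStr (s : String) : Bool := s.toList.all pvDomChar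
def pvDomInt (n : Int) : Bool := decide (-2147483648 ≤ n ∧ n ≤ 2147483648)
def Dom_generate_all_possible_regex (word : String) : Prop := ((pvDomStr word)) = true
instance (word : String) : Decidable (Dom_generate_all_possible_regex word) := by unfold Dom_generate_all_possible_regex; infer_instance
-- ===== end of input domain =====

-- B replaces A's three hand-written nested loop blocks by one recursive combination
-- generator plus a recursive slice-stitching builder (objective: alternative decomposition).

-- ===== PORT A =====
-- the literal '[a-z]{0,2}' as a char list (strings are handled on the List Char side; String.ofList rebuilds the Python str value)
def pvWild : List Char := ['[', 'a', '-', 'z', ']', '{', '0', ',', '2', '}']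

def generate_all_possible_regex (word : String) : List String :=
  let w := word.toList
  let n : Int := PySem.Chars.len w
  -- regex_comb = []; three loop blocks appending, threading the same accumulator
  let acc1 := (PySem.List.pyRange 1 (n - 2) 1).foldl (fun acc i =>
      (PySem.List.pyRange (i + 1) (n - 1) 1).foldl (fun acc j =>
        (PySem.List.pyRange (j + 1) n 1).foldl (fun acc k =>
          acc ++ [String.ofList (PySem.List.slice w none (some i) ++ pvWild ++
                  PySem.List.slice w (some (i + 1)) (some j) ++ pvWild ++
                  PySem.List.slice w (some (j + 1)) (some k) ++ pvWild ++
                  PySem.List.slice w (some (k + 1)) none)]) acc) acc) []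
  let acc2 := (PySem.List.pyRange 1 (n - 1) 1).foldl (fun acc i =>
      (PySem.List.pyRange (i + 1) n 1).foldl (fun acc j =>
        acc ++ [String.ofList (PySem.List.slice w none (some i) ++ pvWild ++
                PySem.List.slice w (some (i + 1)) (some j) ++ pvWild ++
                PySem.List.slice w (some (j + 1)) none)]) acc) acc1
  (PySem.List.pyRange 1 n 1).foldl (fun acc i =>
      acc ++ [String.ofList (PySem.List.slice w none (some i) ++ pvWild ++
              PySem.List.slice w (some (i + 1)) none)]) acc2

-- ===== PORT B =====
-- combos lo r: all increasing index lists of length r drawn from range(lo, n), lex order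
def pvCombos (n : Int) : Int → Nat → List (List Int)
  | _, 0 => [[]]
  | lo, r + 1 => (PySem.List.pyRange lo n 1).flatMap
      (fun i => (pvCombos n (i + 1) r).map (fun c => i :: c))

-- build start idxs: word[start:i0] + '[a-z]{0,2}' + … recursively
def pvBuild (w : List Char) : Int → List Int → List Char
  | start, [] => PySem.List.slice w (some start) none
  | start, i :: rest => PySem.List.slice w (some start) (some i) ++ pvWild ++ pvBuild w (i + 1) rest

def generate_all_possible_regex_alt (word : String) : List String :=
  let w := word.toList
  let n : Int := PySem.Chars.len w
  ([3, 2, 1] : List Nat).flatMap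
    (fun r => (pvCombos n 1 r).map (fun c => String.ofList (pvBuild w 0 c)))

-- ===== PRECONDITION & SPEC =====
def Spec_generate_all_possible_regex (word : String) (out : List String) : Prop := out = generate_all_possible_regex_alt word
instance (word : String) (out : List String) : Decidable (Spec_generate_all_possible_regex word out) := by unfold Spec_generate_all_possible_regex; infer_instance

-- ===== CLAIM (what is proved, stated in full; the proofs are below) =====
def Claim_equal_generate_all_possible_regex : Prop := ∀ (word : String), Dom_generate_all_possible_regex word → Spec_generate_all_possible_regex word (generate_all_possible_regex word)

-- ===== LEMMAS AND PROOFS =====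

-- combos of length 1 is just the range, as singletons
theorem pvCombos_one (n lo : Int) :
    pvCombos n lo 1 = (PySem.List.pyRange lo n 1).map (fun i => [i]) := by
  simp only [pvCombos, List.map_cons, List.map_nil]
  exact List.map_eq_flatMap.symm

-- not enough indices left: no combinations
theorem pvCombos_nil (n : Int) : ∀ (r : Nat) (lo : Int), n < lo + (r + 1) →
    pvCombos n lo (r + 1) = [] := by
  intro r
  induction r with
  | zero =>
    intro lo h
    rw [pvCombos_one, PySem.List.pyRange_one_eq_nil (by omega)]
    rfl
  | succ r ih =>
    intro lo h
    show (PySem.List.pyRange lo n 1).flatMap _ = []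
    rw [List.flatMap_eq_nil_iff]
    intro i hi
    rw [PySem.List.mem_pyRange_one] at hi
    rw [ih (i + 1) (by omega)]
    rfl

-- drop the tail of a range whose elements contribute nothing
theorem pvFlatMap_trunc {α : Type} (lo m n : Int) (hm : m ≤ n) (f : Int → List α)
    (hf : ∀ i, m ≤ i → i < n → f i = []) :
    (PySem.List.pyRange lo n 1).flatMap f = (PySem.List.pyRange lo m 1).flatMap f := by
  rcases le_or_gt lo m with h | h
  · rw [PySem.List.pyRange_one_append lo m n h hm, List.flatMap_append]
    have : (PySem.List.pyRange m n 1).flatMap f = [] := by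
      rw [List.flatMap_eq_nil_iff]
      intro i hi
      rw [PySem.List.mem_pyRange_one] at hi
      exact hf i hi.1 hi.2
    rw [this, List.append_nil]
  · rw [PySem.List.pyRange_one_eq_nil (by omega : m ≤ lo)]
    simp only [List.flatMap_nil, List.flatMap_eq_nil_iff]
    intro i hi
    rw [PySem.List.mem_pyRange_one] at hi
    exact hf i (by omega) hi.2

-- level 1: the one-wildcard block equals combos-of-1 built
theorem pvLevel1 (w : List Char) (s lo : Int) :
    (PySem.List.pyRange lo (w.length : Int) 1).map (fun i =>
        PySem.List.slice w (some s) (some i) ++ pvWild ++ PySem.List.slice w (some (i + 1)) none)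
      = (pvCombos (w.length : Int) lo 1).map (pvBuild w s) := by
  rw [pvCombos_one, List.map_map]
  rfl

-- level 2: the two-wildcard nested loops equal combos-of-2 built
theorem pvLevel2 (w : List Char) (s lo : Int) :
    (PySem.List.pyRange lo ((w.length : Int) - 1) 1).flatMap (fun i =>
        (PySem.List.pyRange (i + 1) (w.length : Int) 1).map (fun j =>
          PySem.List.slice w (some s) (some i) ++ pvWild ++
          PySem.List.slice w (some (i + 1)) (some j) ++ pvWild ++
          PySem.List.slice w (some (j + 1)) none))
      = (pvCombos (w.length : Int) lo 2).map (pvBuild w s) := by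
  show _ = ((PySem.List.pyRange lo (w.length : Int) 1).flatMap
      (fun i => (pvCombos (w.length : Int) (i + 1) 1).map (fun c => i :: c))).map (pvBuild w s)
  rw [List.map_flatMap]
  rw [pvFlatMap_trunc lo ((w.length : Int) - 1) (w.length : Int) (by omega)]
  · apply List.flatMap_congr
    intro i _
    rw [pvCombos_one]
    simp only [List.map_map, Function.comp_def]
    apply List.map_congr_left
    intro j _
    simp [pvBuild, List.append_assoc]
  · intro i h1 h2
    rw [pvCombos_one, PySem.List.pyRange_one_eq_nil (by omega)]
    rfl

-- level 3: the three-wildcard nested loops equal combos-of-3 built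
theorem pvLevel3 (w : List Char) (s lo : Int) :
    (PySem.List.pyRange lo ((w.length : Int) - 2) 1).flatMap (fun i =>
        (PySem.List.pyRange (i + 1) ((w.length : Int) - 1) 1).flatMap (fun j =>
          (PySem.List.pyRange (j + 1) (w.length : Int) 1).map (fun k =>
            PySem.List.slice w (some s) (some i) ++ pvWild ++
            PySem.List.slice w (some (i + 1)) (some j) ++ pvWild ++
            PySem.List.slice w (some (j + 1)) (some k) ++ pvWild ++
            PySem.List.slice w (some (k + 1)) none)))
      = (pvCombos (w.length : Int) lo 3).map (pvBuild w s) := by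
  show _ = ((PySem.List.pyRange lo (w.length : Int) 1).flatMap
      (fun i => (pvCombos (w.length : Int) (i + 1) 2).map (fun c => i :: c))).map (pvBuild w s)
  rw [List.map_flatMap]
  rw [pvFlatMap_trunc lo ((w.length : Int) - 2) (w.length : Int) (by omega)]
  · apply List.flatMap_congr
    intro i _
    simp only [List.map_map, Function.comp_def]
    have hb : ((pvCombos (w.length : Int) (i + 1) 2).map (fun c => pvBuild w s (i :: c)))
        = (pvCombos (w.length : Int) (i + 1) 2).map
            (fun c => PySem.List.slice w (some s) (some i) ++ pvWild ++ pvBuild w (i + 1) c) := rfl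
    rw [hb]
    have hstep := congrArg
      (List.map (fun t => PySem.List.slice w (some s) (some i) ++ pvWild ++ t))
      (pvLevel2 w (i + 1) (i + 1))
    simp only [List.map_map, List.map_flatMap, Function.comp_def] at hstep
    rw [← hstep]
    apply List.flatMap_congr
    intro j _
    apply List.map_congr_left
    intro k _
    simp [List.append_assoc]
  · intro i h1 h2
    rw [pvCombos_nil (w.length : Int) 1 (i + 1) (by omega)]
    rfl

-- ===== VERDICT (by name: the statement is the Claim_ definition above) =====
theorem generate_all_possible_regex_spec : Claim_equal_generate_all_possible_regex := by
  intro word _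
  unfold Spec_generate_all_possible_regex generate_all_possible_regex generate_all_possible_regex_alt
  set w := word.toList with hw
  simp only [PySem.Chars.len_eq, PySem.List.foldl_append_singleton_eq_map,
    PySem.List.foldl_append_eq_flatMap, List.flatMap_cons, List.flatMap_nil, List.append_nil,
    List.nil_append]
  have hm : ∀ r : Nat, (pvCombos (w.length : Int) 1 r).map (fun c => String.ofList (pvBuild w 0 c))
      = ((pvCombos (w.length : Int) 1 r).map (pvBuild w 0)).map String.ofList := by
    intro r; rw [List.map_map]; rfl
  rw [hm 3, hm 2, hm 1]
  have h3 := pvLevel3 w 0 1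
  have h2 := pvLevel2 w 0 1
  have h1 := pvLevel1 w 0 1
  simp only [PySem.List.slice_zero_start] at h3 h2 h1
  rw [← h3, ← h2, ← h1]
  simp only [List.map_flatMap, List.map_map, List.append_assoc, Function.comp_def]
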